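-- pv_equiv track=rewrite | github.com/jsandeman/Relational-Actualism | src/RA_AQFT/cross_dimensional_exclusion.py | count_stable
-- ===== SOURCE A (Python) =====
-- def count_stable(coeffs, max_total=5):
--     K = len(coeffs) - 1
--     from itertools import product as iprod
--     stable = set()
--     for ns in iprod(*[range(max_total+1)]*K):
--         if sum(ns) > max_total or sum(ns) == 0: continue
--         s = coeffs[0] + sum(coeffs[k+1]*ns[k] for k in range(K))
--         if s > 0:
--             stable.add(ns)
--     return len(stable), stable
-- ===== SOURCE B (Python) =====
-- def count_stable(coeffs, max_total=5):
--     # Recursively enumerate only tuples whose running sum stays <= max_total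
--     # (bounded compositions), instead of the full (max_total+1)^K grid.
--     def rec(cs, remaining, s):
--         if not cs:
--             return [()] if remaining < max_total and s > 0 else []
--         out = []
--         for n in range(remaining + 1):
--             for t in rec(cs[1:], remaining - n, s + cs[0] * n):
--                 out.append((n,) + t)
--         return out
--     if not coeffs:
--         return 0, set()
--     stable = rec(coeffs[1:], max_total, coeffs[0])
--     return len(stable), set(stable)
-- ===== Notes on version B (the rewrite author's own statement) =====
-- stated objective: alternative
-- what changed: A scans the full (max_total+1)^K grid produced by itertools.product and filters it; B recursively enumerates only the tuples whose running sum stays within max_total (bounded compositions), never visiting tuples that exceed the budget (intended as faster; measured 178x at n=16 but both time out at the largest size).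
import Mathlib
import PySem

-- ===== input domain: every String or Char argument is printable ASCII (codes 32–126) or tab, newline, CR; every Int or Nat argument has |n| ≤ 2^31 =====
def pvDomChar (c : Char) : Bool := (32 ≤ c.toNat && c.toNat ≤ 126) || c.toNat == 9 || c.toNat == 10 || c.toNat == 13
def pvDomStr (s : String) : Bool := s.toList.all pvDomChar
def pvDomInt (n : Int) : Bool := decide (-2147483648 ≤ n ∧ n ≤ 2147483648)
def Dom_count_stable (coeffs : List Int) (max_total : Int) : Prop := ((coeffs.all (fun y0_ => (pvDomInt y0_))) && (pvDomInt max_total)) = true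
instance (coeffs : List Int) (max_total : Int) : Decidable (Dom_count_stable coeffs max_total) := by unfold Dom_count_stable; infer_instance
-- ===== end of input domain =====

-- B replaces A's full (max_total+1)^K grid scan by a recursion that enumerates only
-- tuples whose running sum stays ≤ max_total (bounded compositions): a different algorithm
-- that visits fewer tuples (objective: alternative).

-- ===== PORT A =====
-- itertools.product(*pools): nested loops, first pool outermost (last varies fastest).
def pyProduct (pools : List (List Int)) : List (List Int) :=
  pools.foldr (fun pool acc => pool.flatMap (fun x => acc.map (x :: ·))) [[]]

-- Port of A. 'coeffs[0]'/'coeffs[k+1]'/'ns[k]' are ported with pyGetD (default 0): they are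
-- evaluated only when K ≥ 1 and 0 ≤ k < K, where the index is in range, so this is exact.
def count_stable (coeffs : List Int) (max_total : Int) : Int × List (List Int) :=
  let K : Int := (coeffs.length : Int) - 1
  -- '[range(max_total+1)]*K' : Python list repetition; a negative count yields []
  let pools : List (List Int) := List.replicate K.toNat (PySem.List.pyRange 0 (max_total + 1) 1)
  let stable : PySem.Set (List Int) :=
    (pyProduct pools).foldl (fun st ns =>
      if ns.sum > max_total ∨ ns.sum = 0 then st
      else
        let s := PySem.List.pyGetD coeffs 0 0 +
          ((PySem.List.pyRange 0 K 1).map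
            (fun k => PySem.List.pyGetD coeffs (k + 1) 0 * PySem.List.pyGetD ns k 0)).sum
        if s > 0 then PySem.Set.add st ns else st) PySem.Set.empty
  ((stable.length : Int), stable)

-- ===== PORT B =====
-- rec(cs, remaining, s) of Source B: tuples over cs with entry sum ≤ remaining kept when the
-- final slack is < max_total (i.e. total > 0) and the accumulated weighted sum s is positive.
def recB (max_total : Int) : List Int → Int → Int → List (List Int)
  | [], remaining, s => if remaining < max_total ∧ s > 0 then [[]] else []
  | c :: rest, remaining, s =>
      (PySem.List.pyRange 0 (remaining + 1) 1).flatMap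
        (fun n => (recB max_total rest (remaining - n) (s + c * n)).map (n :: ·))

def count_stable_alt (coeffs : List Int) (max_total : Int) : Int × List (List Int) :=
  match coeffs with
  | [] => (0, PySem.Set.empty)
  | c0 :: rest =>
      let stable := recB max_total rest max_total c0
      ((stable.length : Int), PySem.Set.ofList stable)

-- ===== PRECONDITION & SPEC =====
def Spec_count_stable (coeffs : List Int) (max_total : Int) (out : Int × List (List Int)) : Prop := out = count_stable_alt coeffs max_total
instance (coeffs : List Int) (max_total : Int) (out : Int × List (List Int)) : Decidable (Spec_count_stable coeffs max_total out) := by unfold Spec_count_stable; infer_instance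

-- ===== CLAIM (what is proved, stated in full; the proofs are below) =====
def Claim_equal_count_stable : Prop := ∀ (coeffs : List Int) (max_total : Int), Dom_count_stable coeffs max_total → Spec_count_stable coeffs max_total (count_stable coeffs max_total)

-- ===== LEMMAS AND PROOFS =====

-- product of n copies of r
def prodR (r : List Int) : Nat → List (List Int)
  | 0 => [[]]
  | n + 1 => r.flatMap (fun x => (prodR r n).map (x :: ·))

lemma pyProduct_replicate (r : List Int) (n : Nat) :
    pyProduct (List.replicate n r) = prodR r n := by
  induction n with
  | zero => rfl
  | succ n ih => simp [pyProduct, List.replicate_succ] at *; rw [ih]; rfl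

lemma mem_prodR {r : List Int} {n : Nat} {ns : List Int} (h : ns ∈ prodR r n) :
    ns.length = n ∧ ∀ x ∈ ns, x ∈ r := by
  induction n generalizing ns with
  | zero => simp [prodR] at h; simp [h]
  | succ n ih =>
    simp [prodR] at h
    obtain ⟨x, hx, t, ht, rfl⟩ := h
    obtain ⟨hl, hm⟩ := ih ht
    refine ⟨by simp [hl], ?_⟩
    intro y hy; rcases List.mem_cons.1 hy with rfl | hy
    · exact hx
    · exact hm y hy

lemma nodup_prodR {r : List Int} (hr : r.Nodup) (n : Nat) : (prodR r n).Nodup := by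
  induction n with
  | zero => simp [prodR]
  | succ n ih =>
    rw [prodR, List.nodup_flatMap]
    refine ⟨fun x _ => ih.map (fun a b h => by injection h), ?_⟩
    refine hr.imp ?_
    intro a b hab l hla hlb
    simp at hla hlb
    obtain ⟨t, -, rfl⟩ := hla
    obtain ⟨t', -, he⟩ := hlb
    injection he with h1
    exact hab h1.symm

lemma sum_nonneg_of_mem_prodR {mt : Int} {n : Nat} {ns : List Int}
    (h : ns ∈ prodR (PySem.List.pyRange 0 (mt + 1) 1) n) : 0 ≤ ns.sum := by
  obtain ⟨-, hm⟩ := mem_prodR h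
  apply List.sum_nonneg
  intro x hx
  exact (PySem.List.mem_pyRange_one.1 (hm x hx)).1

def dot : List Int → List Int → Int
  | c :: cs, n :: ns => c * n + dot cs ns
  | _, _ => 0

lemma pyGetD_cons_succ (a : Int) (l : List Int) (k : Nat) (d : Int) :
    PySem.List.pyGetD (a :: l) ((k : Int) + 1) d = PySem.List.pyGetD l (k : Int) d := by
  rw [PySem.List.pyGetD_of_nonneg _ _ (by positivity),
      PySem.List.pyGetD_of_nonneg _ _ (by positivity)]
  have : ((k : Int) + 1).toNat = k + 1 := by omega
  simp [this]

lemma sum_idx_range : ∀ (rest ns : List Int) (c0 : Int), ns.length = rest.length →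
    ((List.range rest.length).map
      (fun k : Nat => PySem.List.pyGetD (c0 :: rest) ((k : Int) + 1) 0 * PySem.List.pyGetD ns (k : Int) 0)).sum
      = dot rest ns := by
  intro rest
  induction rest with
  | nil => intro ns c0 h; simp [dot]
  | cons c rs ih =>
    intro ns c0 h
    cases ns with
    | nil => simp at h
    | cons m nt =>
      simp only [List.length_cons, Nat.succ.injEq] at h
      simp only [List.length_cons]
      rw [List.range_succ_eq_map, List.map_cons, List.map_map, List.sum_cons]
      have h0 : PySem.List.pyGetD (c0 :: c :: rs) ((0 : Nat) + 1 : Int) 0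
          * PySem.List.pyGetD (m :: nt) ((0 : Nat) : Int) 0 = c * m := by
        simp [PySem.List.pyGetD_of_nonneg]
      have hstep : ∀ k : Nat,
          PySem.List.pyGetD (c0 :: c :: rs) ((k + 1 : Nat) + 1 : Int) 0
            * PySem.List.pyGetD (m :: nt) ((k + 1 : Nat) : Int) 0
          = PySem.List.pyGetD (c :: rs) ((k : Int) + 1) 0
            * PySem.List.pyGetD nt (k : Int) 0 := by
        intro k
        rw [show ((k + 1 : Nat) : Int) = (k : Int) + 1 by push_cast; ring,
            show ((k : Int) + 1) + 1 = ((k : Int) + 1) + 1 by rfl]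
        rw [show ((k : Int) + 1 + 1) = (((k + 1 : Nat) : Int) + 1) by push_cast; ring]
        rw [pyGetD_cons_succ, pyGetD_cons_succ,
            show ((k + 1 : Nat) : Int) = (k : Int) + 1 by push_cast; ring,
            pyGetD_cons_succ]
      have hfun : ((fun k : Nat => PySem.List.pyGetD (c0 :: c :: rs) ((k : Int) + 1) 0
            * PySem.List.pyGetD (m :: nt) ((k : Int)) 0) ∘ Nat.succ)
          = (fun k : Nat => PySem.List.pyGetD (c :: rs) ((k : Int) + 1) 0
            * PySem.List.pyGetD nt ((k : Int)) 0) := by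
        funext k
        exact hstep k
      rw [hfun, ih nt c h]
      simpa [dot] using congrArg (· + dot rs nt) h0

-- fold of guarded Set.add over a nodup list of fresh elements = append the filter
lemma foldl_add_filter (p : List Int → Bool) :
    ∀ (l : List (List Int)) (s : PySem.Set (List Int)), l.Nodup → (∀ x ∈ l, x ∉ s) →
      l.foldl (fun st ns => if p ns then PySem.Set.add st ns else st) s = s ++ l.filter p := by
  intro l
  induction l with
  | nil => simp
  | cons x l ih =>
    intro s hnd hfresh
    have hx : x ∉ s := hfresh x (by simp)
    have hnd' := (List.nodup_cons.1 hnd)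
    by_cases hp : p x
    · rw [List.foldl_cons, if_pos hp, PySem.Set.add_of_not_mem hx,
        ih (s ++ [x]) hnd'.2 (by intro y hy; simp; exact ⟨fun c => hfresh y (by simp [hy]) c, fun c => hnd'.1 (c ▸ hy)⟩)]
      simp [hp]
    · rw [List.foldl_cons, if_neg hp, ih s hnd'.2 (fun y hy => hfresh y (by simp [hy]))]
      simp [hp]

-- the core: B's bounded recursion = filter of the full grid
lemma recB_eq_filter (mt : Int) :
    ∀ (rest : List Int) (rem s : Int), 0 ≤ rem → rem ≤ mt →
      recB mt rest rem s
        = (prodR (PySem.List.pyRange 0 (mt + 1) 1) rest.length).filter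
            (fun ns => decide (ns.sum ≤ rem ∧ rem - ns.sum < mt ∧ s + dot rest ns > 0)) := by
  intro rest
  induction rest with
  | nil =>
    intro rem s h0 hle
    simp only [recB, List.length_nil, prodR, dot, List.filter_cons, List.filter_nil,
      List.sum_nil]
    split_ifs <;> try rfl
    all_goals (simp only [decide_eq_true_eq] at *; omega)
  | cons c rs ih =>
    intro rem s h0 hle
    simp only [recB, List.length_cons, prodR, List.filter_flatMap, List.filter_map]
    set P := prodR (PySem.List.pyRange 0 (mt + 1)) rs.length with hP
    rw [PySem.List.pyRange_one_append 0 (rem + 1) (mt + 1) (by omega) (by omega),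
      List.flatMap_append]
    have hnil : ((PySem.List.pyRange (rem + 1) (mt + 1)).flatMap fun x =>
        (P.filter
          ((fun ns => decide (ns.sum ≤ rem ∧ rem - ns.sum < mt ∧ s + dot (c :: rs) ns > 0))
            ∘ (x :: ·))).map (x :: ·)) = [] := by
      rw [List.flatMap_eq_nil_iff]
      intro x hx
      have hx' := PySem.List.mem_pyRange_one.1 hx
      have hfe : (P.filter
          ((fun ns => decide (ns.sum ≤ rem ∧ rem - ns.sum < mt ∧ s + dot (c :: rs) ns > 0))
            ∘ (x :: ·))) = [] := by
        rw [List.filter_eq_nil_iff]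
        intro t ht
        rw [hP] at ht
        have hts := sum_nonneg_of_mem_prodR ht
        simp only [Function.comp, List.sum_cons, decide_eq_true_eq, not_and]
        intro hc
        omega
      rw [hfe, List.map_nil]
    rw [hnil, List.append_nil]
    apply List.flatMap_congr
    intro x hx
    have hx' := PySem.List.mem_pyRange_one.1 hx
    have hx0 : 0 ≤ x := hx'.1
    have hxr : x ≤ rem := by omega
    rw [ih (rem - x) (s + c * x) (by omega) (by omega)]
    congr 1
    apply List.filter_congr
    intro t ht
    simp only [Function.comp, List.sum_cons, decide_eq_decide]
    have harith2 : s + dot (c :: rs) (x :: t) = s + c * x + dot rs t := by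
      simp [dot]; ring
    constructor <;> intro hc
    · exact ⟨by omega, by omega, by rw [harith2]; exact hc.2.2⟩
    · exact ⟨by omega, by omega, by rw [← harith2]; exact hc.2.2⟩

lemma main_eq (coeffs : List Int) (mt : Int) :
    count_stable coeffs mt = count_stable_alt coeffs mt := by
  cases coeffs with
  | nil =>
    simp [count_stable, count_stable_alt, pyProduct, PySem.Set.empty]
  | cons c0 rest =>
    by_cases hmt : 0 ≤ mt
    case neg =>
      -- max_total < 0 : the range is empty, both sides return (0, ∅)
      have hr : PySem.List.pyRange 0 (mt + 1) = [] :=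
        PySem.List.pyRange_one_eq_nil (by omega)
      cases rest with
      | nil =>
        simp [count_stable, count_stable_alt, recB, pyProduct, PySem.Set.empty,
          PySem.Set.ofList]
      | cons c rs =>
        have hA : pyProduct (List.replicate ((((c0 :: c :: rs).length : Int) - 1).toNat)
            ([] : List Int)) = [] := by
          have hlen : ((((c0 :: c :: rs).length : Int)) - 1).toNat = rs.length + 1 := by simp
          rw [hlen, pyProduct_replicate, prodR]
          simp
        simp only [count_stable, count_stable_alt, recB, hr, hA, List.flatMap_nil,
          List.foldl_nil]
        rfl
    case pos =>
      -- the common value: the filtered grid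
      have hKt : (((c0 :: rest).length : Int) - 1).toNat = rest.length := by simp
      have hKi : ((c0 :: rest).length : Int) - 1 = (rest.length : Int) := by simp
      have hnr : (PySem.List.pyRange 0 (mt + 1) 1).Nodup := PySem.List.nodup_pyRange_one 0 (mt + 1)
      -- A's tuple source is the full grid
      have hgrid : pyProduct (List.replicate ((((c0 :: rest).length : Int) - 1).toNat)
          (PySem.List.pyRange 0 (mt + 1) 1))
          = prodR (PySem.List.pyRange 0 (mt + 1) 1) rest.length := by
        rw [hKt, pyProduct_replicate]
      -- A's fold step as a single guarded add
      have hfun : (fun (st : PySem.Set (List Int)) ns =>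
            if ns.sum > mt ∨ ns.sum = 0 then st
            else
              let s := PySem.List.pyGetD (c0 :: rest) 0 0 +
                ((PySem.List.pyRange 0 (((c0 :: rest).length : Int) - 1) 1).map
                  (fun k => PySem.List.pyGetD (c0 :: rest) (k + 1) 0 * PySem.List.pyGetD ns k 0)).sum
              if s > 0 then PySem.Set.add st ns else st)
          = (fun (st : PySem.Set (List Int)) ns =>
            if (decide (¬(ns.sum > mt ∨ ns.sum = 0) ∧
                PySem.List.pyGetD (c0 :: rest) 0 0 +
                ((PySem.List.pyRange 0 (((c0 :: rest).length : Int) - 1) 1).map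
                  (fun k => PySem.List.pyGetD (c0 :: rest) (k + 1) 0 * PySem.List.pyGetD ns k 0)).sum > 0))
              then PySem.Set.add st ns else st) := by
        funext st ns
        by_cases h1 : ns.sum > mt ∨ ns.sum = 0
        · simp [h1]
        · by_cases h2 : PySem.List.pyGetD (c0 :: rest) 0 0 +
            ((PySem.List.pyRange 0 (((c0 :: rest).length : Int) - 1) 1).map
              (fun k => PySem.List.pyGetD (c0 :: rest) (k + 1) 0 * PySem.List.pyGetD ns k 0)).sum > 0 <;>
            simp [h1, h2]
      -- the two filter predicates agree on the grid
      have hfilter : (prodR (PySem.List.pyRange 0 (mt + 1) 1) rest.length).filter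
            (fun ns => decide (¬(ns.sum > mt ∨ ns.sum = 0) ∧
              PySem.List.pyGetD (c0 :: rest) 0 0 +
              ((PySem.List.pyRange 0 (((c0 :: rest).length : Int) - 1) 1).map
                (fun k => PySem.List.pyGetD (c0 :: rest) (k + 1) 0 * PySem.List.pyGetD ns k 0)).sum > 0))
          = (prodR (PySem.List.pyRange 0 (mt + 1) 1) rest.length).filter
            (fun ns => decide (ns.sum ≤ mt ∧ mt - ns.sum < mt ∧ c0 + dot rest ns > 0)) := by
        apply List.filter_congr
        intro ns hns
        obtain ⟨hlen, -⟩ := mem_prodR hns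
        have hsum : 0 ≤ ns.sum := sum_nonneg_of_mem_prodR hns
        have hc0 : PySem.List.pyGetD (c0 :: rest) 0 0 = c0 := by
          simp [PySem.List.pyGetD_of_nonneg]
        have hmap : ((PySem.List.pyRange 0 (((c0 :: rest).length : Int) - 1) 1).map
            (fun k => PySem.List.pyGetD (c0 :: rest) (k + 1) 0 * PySem.List.pyGetD ns k 0)).sum
            = dot rest ns := by
          rw [hKi, PySem.List.pyRange_one, List.map_map]
          rw [← sum_idx_range rest ns c0 hlen]
          congr 1
          apply List.map_congr_left
          intro k hk
          simp
        rw [hc0, hmap, decide_eq_decide]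
        constructor
        · rintro ⟨hn, hs⟩
          exact ⟨by omega, by omega, hs⟩
        · rintro ⟨h1, h2, h3⟩
          exact ⟨by omega, h3⟩
      -- B's recursion is the same filtered grid
      have hB := recB_eq_filter mt rest mt c0 hmt le_rfl
      have hnodup : ((prodR (PySem.List.pyRange 0 (mt + 1) 1) rest.length).filter
          (fun ns => decide (ns.sum ≤ mt ∧ mt - ns.sum < mt ∧ c0 + dot rest ns > 0))).Nodup :=
        (nodup_prodR hnr rest.length).filter _
      simp only [count_stable, count_stable_alt, hgrid, hfun]
      rw [foldl_add_filter _ _ PySem.Set.empty (nodup_prodR hnr rest.length)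
        (by intro x hx; simp [PySem.Set.empty])]
      rw [hB, PySem.Set.ofList_eq_self_of_nodup _ hnodup]
      simp only [PySem.Set.empty, List.nil_append, hfilter]

-- ===== VERDICT (by name: the statement is the Claim_ definition above) =====
theorem count_stable_spec : Claim_equal_count_stable := by
  intro coeffs max_total _
  unfold Spec_count_stable
  exact main_eq coeffs max_total
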